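-- pv_equiv track=rewrite | github.com/bradleygay/zerocurtain | src/detection/zero_curtain_detector.py | _find_periods
-- ===== SOURCE A (Python) =====
-- def _find_periods(mask, min_length):
--     """Find continuous True periods."""
--     periods = []
--     start = None
--
--     for i, val in enumerate(mask):
--         if val and start is None:
--             start = i
--         elif not val and start is not None:
--             if i - start >= min_length:
--                 periods.append((start, i-1))
--             start = None
--
--     if start is not None and len(mask) - start >= min_length:
--         periods.append((start, len(mask)-1))
--
--     return periods
-- ===== SOURCE B (Python) =====
-- def _find_periods(mask, min_length):
--     """Find continuous True periods by boundary detection: one pass collects run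
--     starts, one pass collects run ends, then the paired boundaries are filtered
--     by length.  (Staged passes instead of an online state machine.)"""
--     n = len(mask)
--     starts = [i for i in range(n) if mask[i] and (i == 0 or not mask[i - 1])]
--     ends = [i for i in range(n) if mask[i] and (i == n - 1 or not mask[i + 1])]
--     return [(s, e) for s, e in zip(starts, ends) if e - s + 1 >= min_length]
-- ===== Notes on version B (the rewrite author's own statement) =====
-- stated objective: alternative
-- what changed: Replaces A's single-pass online state machine (pending-start sentinel plus trailing-run epilogue) with staged boundary detection: one comprehension collects run starts, one collects run ends, and the zipped boundary pairs are filtered by length.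
import Mathlib
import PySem

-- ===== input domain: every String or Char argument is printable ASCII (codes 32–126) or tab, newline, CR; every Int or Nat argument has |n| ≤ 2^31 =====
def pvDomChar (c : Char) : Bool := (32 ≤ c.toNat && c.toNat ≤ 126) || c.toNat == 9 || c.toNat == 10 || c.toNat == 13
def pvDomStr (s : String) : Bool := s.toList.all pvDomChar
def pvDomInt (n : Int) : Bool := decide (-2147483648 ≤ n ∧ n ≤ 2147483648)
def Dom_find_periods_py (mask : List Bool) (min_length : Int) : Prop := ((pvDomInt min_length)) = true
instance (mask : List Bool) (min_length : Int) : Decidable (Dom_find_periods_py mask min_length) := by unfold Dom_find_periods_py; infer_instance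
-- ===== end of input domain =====

-- B replaces A's online state machine (pending-start sentinel + trailing-run epilogue)
-- with staged boundary detection: collect run starts, collect run ends, zip and filter
-- by length; same O(n) cost, a genuinely different decomposition (objective: alternative).


-- ===== PORT A =====
-- A's for-loop as structural recursion over the list, carrying the enumerate index i,
-- the optional pending start and the accumulated periods.  In the [] case i equals
-- len(mask), so A's final 'len(mask) - start' / 'len(mask) - 1' check is taken verbatim with i.
def aGo (min_length : Int) : List Bool → Int → Option Int → List (Int × Int) → List (Int × Int)
  | [], i, start, periods =>
    match start with
    | some s => if i - s ≥ min_length then periods ++ [(s, i - 1)] else periods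
    | none => periods
  | v :: rest, i, start, periods =>
    match v, start with
    | true, none => aGo min_length rest (i + 1) (some i) periods
    | false, some s =>
        aGo min_length rest (i + 1) none
          (if i - s ≥ min_length then periods ++ [(s, i - 1)] else periods)
    | _, _ => aGo min_length rest (i + 1) start periods

def find_periods_py (mask : List Bool) (min_length : Int) : List (Int × Int) :=
  aGo min_length mask 0 none []

-- ===== PORT B =====
-- B's first comprehension: indices i with mask[i] true whose left neighbour is absent or false.
def bStarts (mask : List Bool) : List Nat :=
  (List.range mask.length).filter
    (fun i => mask.getD i false && (decide (i = 0) || !(mask.getD (i - 1) false)))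

-- B's second comprehension: indices i with mask[i] true whose right neighbour is absent or false.
def bEnds (mask : List Bool) : List Nat :=
  (List.range mask.length).filter
    (fun i => mask.getD i false && (decide (i = mask.length - 1) || !(mask.getD (i + 1) false)))

-- B's final comprehension: zip the paired boundaries, keep the long-enough ones.
def find_periods_py_alt (mask : List Bool) (min_length : Int) : List (Int × Int) :=
  (((bStarts mask).zip (bEnds mask)).filter
      (fun p => decide ((p.2 : Int) - (p.1 : Int) + 1 ≥ min_length))).map
    (fun p => ((p.1 : Int), (p.2 : Int)))

-- ===== PRECONDITION & SPEC =====
def Spec_find_periods_py (mask : List Bool) (min_length : Int) (out : List (Int × Int)) : Prop := out = find_periods_py_alt mask min_length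
instance (mask : List Bool) (min_length : Int) (out : List (Int × Int)) : Decidable (Spec_find_periods_py mask min_length out) := by unfold Spec_find_periods_py; infer_instance

-- ===== CLAIM =====
def Claim_equal_find_periods_py : Prop := ∀ (mask : List Bool) (min_length : Int), Dom_find_periods_py mask min_length → Spec_find_periods_py mask min_length (find_periods_py mask min_length)

-- ===== LEMMAS AND PROOFS =====

-- Proof-side intermediate: a run-at-a-time scan bridging the two programs.
def bGo (min_length : Int) : List Bool → Int → List (Int × Int)
  | [], _ => []
  | b :: rest, i =>
    let n : Int := (rest.takeWhile (· == b)).length + 1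
    (if b = true ∧ n ≥ min_length then [(i, i + n - 1)] else []) ++
      bGo min_length (rest.dropWhile (· == b)) (i + n)
termination_by l _ => l.length
decreasing_by
  exact Nat.lt_succ_of_le (List.length_dropWhile_le _ _)

-- ---- A = bGo (state machine consumed run by run) ----

lemma aGo_run_true (m : Int) (run : List Bool) (h : ∀ x ∈ run, x = true) :
    ∀ (rest : List Bool) (i s : Int) (P : List (Int × Int)),
      aGo m (run ++ rest) i (some s) P = aGo m rest (i + run.length) (some s) P := by
  induction run with
  | nil => intro rest i s P; simp
  | cons x run' ih =>
      intro rest i s P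
      have hx : x = true := h x (by simp)
      subst hx
      have h' : ∀ y ∈ run', y = true := fun y hy => h y (by simp [hy])
      have step : aGo m (true :: run' ++ rest) i (some s) P
          = aGo m (run' ++ rest) (i + 1) (some s) P := rfl
      rw [step, ih h']
      have hidx : i + 1 + ((run'.length : Int)) = i + (((true :: run').length : Int)) := by
        simp only [List.length_cons]; push_cast; ring
      rw [hidx]

lemma aGo_run_false (m : Int) (run : List Bool) (h : ∀ x ∈ run, x = false) :
    ∀ (rest : List Bool) (i : Int) (P : List (Int × Int)),
      aGo m (run ++ rest) i none P = aGo m rest (i + run.length) none P := by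
  induction run with
  | nil => intro rest i P; simp
  | cons x run' ih =>
      intro rest i P
      have hx : x = false := h x (by simp)
      subst hx
      have h' : ∀ y ∈ run', y = false := fun y hy => h y (by simp [hy])
      have step : aGo m (false :: run' ++ rest) i none P
          = aGo m (run' ++ rest) (i + 1) none P := rfl
      rw [step, ih h']
      have hidx : i + 1 + ((run'.length : Int)) = i + (((false :: run').length : Int)) := by
        simp only [List.length_cons]; push_cast; ring
      rw [hidx]

lemma aGo_flush (m : Int) (l : List Bool) (hd : ∀ x, l.head? = some x → x = false) :
    ∀ (i s : Int) (P : List (Int × Int)),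
      aGo m l i (some s) P
        = aGo m l i none (if i - s ≥ m then P ++ [(s, i - 1)] else P) := by
  intro i s P
  cases l with
  | nil => simp [aGo]
  | cons x r =>
      have hx : x = false := hd x rfl
      subst hx
      rfl

lemma head_dropWhile_false {α : Type} (p : α → Bool) (l : List α) :
    ∀ x, (l.dropWhile p).head? = some x → p x = false := by
  intro x hx
  have h := List.head?_dropWhile_not p l
  rw [hx] at h
  exact h

lemma aGo_eq_bGo (m : Int) :
    ∀ (k : Nat) (l : List Bool), l.length ≤ k →
      ∀ (i : Int) (P : List (Int × Int)),
        aGo m l i none P = P ++ bGo m l i := by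
  intro k
  induction k with
  | zero =>
      intro l hl i P
      have : l = [] := List.length_eq_zero_iff.mp (Nat.le_zero.mp hl)
      subst this
      simp [aGo, bGo]
  | succ k' ih =>
      intro l hl i P
      cases l with
      | nil => simp [aGo, bGo]
      | cons b rest =>
          have hsplit : rest.takeWhile (· == b) ++ rest.dropWhile (· == b) = rest :=
            List.takeWhile_append_dropWhile
          have hrest' : (rest.dropWhile (· == b)).length ≤ k' := by
            have h1 := List.length_dropWhile_le (· == b) rest
            simp at hl
            omega
          have hlen : i + 1 + ((rest.takeWhile (· == b)).length : Int)
              = i + (((rest.takeWhile (· == b)).length : Int) + 1) := by ring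
          cases b with
          | true =>
              have hruns : ∀ x ∈ rest.takeWhile (· == true), x = true := by
                intro x hx
                simpa using List.mem_takeWhile_imp hx
              have hdrop : ∀ x, (rest.dropWhile (· == true)).head? = some x → x = false := by
                intro x hx
                simpa using head_dropWhile_false (· == true) rest x hx
              have step : aGo m (true :: rest) i none P = aGo m rest (i + 1) (some i) P := rfl
              rw [step]
              conv_lhs => rw [← hsplit]
              rw [aGo_run_true m _ hruns, aGo_flush m _ hdrop, ih _ hrest']
              simp only [bGo]
              rw [hlen]
              set L : Int := ((rest.takeWhile (· == true)).length : Int) with hL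
              by_cases hm : L + 1 ≥ m
              · rw [if_pos (show i + (L + 1) - i ≥ m by omega),
                    if_pos (show True ∧ L + 1 ≥ m from ⟨trivial, hm⟩)]
                simp
              · rw [if_neg (show ¬ (i + (L + 1) - i ≥ m) by omega),
                    if_neg (by simp [hm])]
                simp
          | false =>
              have hruns : ∀ x ∈ rest.takeWhile (· == false), x = false := by
                intro x hx
                simpa using List.mem_takeWhile_imp hx
              have step : aGo m (false :: rest) i none P = aGo m rest (i + 1) none P := rfl
              rw [step]
              conv_lhs => rw [← hsplit]
              rw [aGo_run_false m _ hruns, ih _ hrest']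
              simp only [bGo]
              rw [hlen]
              rw [if_neg (by simp)]
              simp

-- ---- B = bGo (boundary lists of a run-headed list) ----

lemma getD_rep (L : Nat) (b : Bool) (rest : List Bool) (i : Nat) :
    (List.replicate L b ++ rest).getD i false
      = if i < L then b else rest.getD (i - L) false := by
  by_cases h : i < L
  · rw [if_pos h, List.getD_eq_getElem?_getD,
        List.getElem?_append_left (by simpa using h), List.getElem?_replicate]
    simp [h]
  · rw [if_neg h, List.getD_eq_getElem?_getD,
        List.getElem?_append_right (by simpa using Nat.le_of_not_lt h)]
    simp [List.getD_eq_getElem?_getD]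

lemma filter_range_single (n k : Nat) (h : k < n) :
    (List.range n).filter (fun i => decide (i = k)) = [k] := by
  induction n with
  | zero => omega
  | succ n' ih =>
      rw [List.range_succ, List.filter_append]
      by_cases hk : k < n'
      · rw [ih hk]
        have : n' ≠ k := by omega
        simp [this]
      · have hkn : k = n' := by omega
        subst hkn
        have : (List.range k).filter (fun i => decide (i = k)) = [] := by
          apply List.filter_eq_nil_iff.mpr
          intro a ha
          have : a < k := List.mem_range.mp ha
          simp; omega
        rw [this]
        simp

lemma starts_true_run (L : Nat) (hL : 1 ≤ L) (rest : List Bool)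
    (hrest : rest.getD 0 false = false) :
    bStarts (List.replicate L true ++ rest)
      = 0 :: (bStarts rest).map (fun j => L + j) := by
  have hrest2 : rest[0]?.getD false = false := by
    simpa [List.getD_eq_getElem?_getD] using hrest
  unfold bStarts
  rw [List.length_append, List.length_replicate, List.range_add, List.filter_append,
      List.filter_map]
  have h1 : (List.range L).filter
      (fun i => (List.replicate L true ++ rest).getD i false &&
        (decide (i = 0) || !((List.replicate L true ++ rest).getD (i - 1) false)))
      = [0] := by
    have hc : ∀ i ∈ List.range L,
        ((List.replicate L true ++ rest).getD i false &&
          (decide (i = 0) || !((List.replicate L true ++ rest).getD (i - 1) false)))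
        = decide (i = 0) := by
      intro i hi
      have hiL : i < L := List.mem_range.mp hi
      rw [getD_rep, getD_rep, if_pos hiL, if_pos (by omega)]
      by_cases h0 : i = 0 <;> simp [h0]
    rw [List.filter_congr hc]
    exact filter_range_single L 0 hL
  have h2 : ∀ j ∈ List.range rest.length,
      (((fun i => (List.replicate L true ++ rest).getD i false &&
          (decide (i = 0) || !((List.replicate L true ++ rest).getD (i - 1) false))) ∘
        (fun j => L + j)) j)
      = (rest.getD j false && (decide (j = 0) || !(rest.getD (j - 1) false))) := by
    intro j hj
    simp only [Function.comp]
    rw [getD_rep, if_neg (by omega), getD_rep]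
    by_cases h0 : j = 0
    · subst h0
      rw [if_pos (by omega)]
      simp [hrest2]
    · rw [if_neg (by omega)]
      have e1 : L + j - L = j := by omega
      have e2 : L + j - 1 - L = j - 1 := by omega
      have e3 : ¬ (L + j = 0) := by omega
      simp [e1, e2, h0]
  rw [h1, List.filter_congr h2]
  rfl

lemma ends_true_run (L : Nat) (hL : 1 ≤ L) (rest : List Bool)
    (hrest : rest.getD 0 false = false) :
    bEnds (List.replicate L true ++ rest)
      = (L - 1) :: (bEnds rest).map (fun j => L + j) := by
  have hrest2 : rest[0]?.getD false = false := by
    simpa [List.getD_eq_getElem?_getD] using hrest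
  unfold bEnds
  rw [List.length_append, List.length_replicate, List.range_add, List.filter_append,
      List.filter_map]
  have h1 : (List.range L).filter
      (fun i => (List.replicate L true ++ rest).getD i false &&
        (decide (i = L + rest.length - 1) ||
          !((List.replicate L true ++ rest).getD (i + 1) false)))
      = [L - 1] := by
    have hc : ∀ i ∈ List.range L,
        ((List.replicate L true ++ rest).getD i false &&
          (decide (i = L + rest.length - 1) ||
            !((List.replicate L true ++ rest).getD (i + 1) false)))
        = decide (i = L - 1) := by
      intro i hi
      have hiL : i < L := List.mem_range.mp hi
      rw [getD_rep, getD_rep, if_pos hiL]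
      by_cases hlast : i = L - 1
      · subst hlast
        rw [if_neg (by omega)]
        have e1 : L - 1 + 1 - L = 0 := by omega
        simp [e1, hrest2]
      · rw [if_pos (by omega)]
        have : ¬ (i = L + rest.length - 1) := by omega
        simp [this, hlast]
    rw [List.filter_congr hc]
    exact filter_range_single L (L - 1) (by omega)
  have h2 : ∀ j ∈ List.range rest.length,
      (((fun i => (List.replicate L true ++ rest).getD i false &&
          (decide (i = L + rest.length - 1) ||
            !((List.replicate L true ++ rest).getD (i + 1) false))) ∘
        (fun j => L + j)) j)
      = (rest.getD j false &&
          (decide (j = rest.length - 1) || !(rest.getD (j + 1) false))) := by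
    intro j hj
    have hjr : j < rest.length := List.mem_range.mp hj
    simp only [Function.comp]
    rw [getD_rep, if_neg (by omega), getD_rep, if_neg (by omega)]
    have e1 : L + j - L = j := by omega
    have e2 : L + j + 1 - L = j + 1 := by omega
    have e3 : (L + j = L + rest.length - 1) = (j = rest.length - 1) := by
      apply propext; constructor <;> intro h <;> omega
    simp [e1, e2, e3]
  rw [h1, List.filter_congr h2]
  rfl

lemma starts_false_run (L : Nat) (rest : List Bool) :
    bStarts (List.replicate L false ++ rest)
      = (bStarts rest).map (fun j => L + j) := by
  unfold bStarts
  rw [List.length_append, List.length_replicate, List.range_add, List.filter_append,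
      List.filter_map]
  have h1 : (List.range L).filter
      (fun i => (List.replicate L false ++ rest).getD i false &&
        (decide (i = 0) || !((List.replicate L false ++ rest).getD (i - 1) false)))
      = [] := by
    apply List.filter_eq_nil_iff.mpr
    intro i hi
    have hiL : i < L := List.mem_range.mp hi
    rw [getD_rep, if_pos hiL]
    simp
  have h2 : ∀ j ∈ List.range rest.length,
      (((fun i => (List.replicate L false ++ rest).getD i false &&
          (decide (i = 0) || !((List.replicate L false ++ rest).getD (i - 1) false))) ∘
        (fun j => L + j)) j)
      = (rest.getD j false && (decide (j = 0) || !(rest.getD (j - 1) false))) := by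
    intro j hj
    simp only [Function.comp]
    rw [getD_rep, if_neg (by omega), getD_rep]
    by_cases h0 : j = 0
    · subst h0
      by_cases hL0 : L = 0
      · subst hL0; simp
      · rw [if_pos (by omega)]
        simp
    · rw [if_neg (by omega)]
      have e1 : L + j - L = j := by omega
      have e2 : L + j - 1 - L = j - 1 := by omega
      have e3 : ¬ (L + j = 0) := by omega
      simp [e1, e2, h0]
  rw [h1, List.filter_congr h2, List.nil_append]

lemma ends_false_run (L : Nat) (rest : List Bool) :
    bEnds (List.replicate L false ++ rest)
      = (bEnds rest).map (fun j => L + j) := by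
  unfold bEnds
  rw [List.length_append, List.length_replicate, List.range_add, List.filter_append,
      List.filter_map]
  have h1 : (List.range L).filter
      (fun i => (List.replicate L false ++ rest).getD i false &&
        (decide (i = L + rest.length - 1) ||
          !((List.replicate L false ++ rest).getD (i + 1) false)))
      = [] := by
    apply List.filter_eq_nil_iff.mpr
    intro i hi
    have hiL : i < L := List.mem_range.mp hi
    rw [getD_rep, if_pos hiL]
    simp
  have h2 : ∀ j ∈ List.range rest.length,
      (((fun i => (List.replicate L false ++ rest).getD i false &&
          (decide (i = L + rest.length - 1) ||
            !((List.replicate L false ++ rest).getD (i + 1) false))) ∘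
        (fun j => L + j)) j)
      = (rest.getD j false &&
          (decide (j = rest.length - 1) || !(rest.getD (j + 1) false))) := by
    intro j hj
    have hjr : j < rest.length := List.mem_range.mp hj
    simp only [Function.comp]
    rw [getD_rep, if_neg (by omega), getD_rep, if_neg (by omega)]
    have e1 : L + j - L = j := by omega
    have e2 : L + j + 1 - L = j + 1 := by omega
    have e3 : (L + j = L + rest.length - 1) = (j = rest.length - 1) := by
      apply propext; constructor <;> intro h <;> omega
    simp [e1, e2, e3]
  rw [h1, List.filter_congr h2, List.nil_append]

-- the zipped-and-filtered boundary pairs, shifted by an arbitrary base index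
lemma bGo_eq_boundaries (m : Int) :
    ∀ (k : Nat) (l : List Bool), l.length ≤ k → ∀ (i : Int),
      bGo m l i
        = ((((bStarts l).zip (bEnds l)).filter
              (fun p => decide ((p.2 : Int) - (p.1 : Int) + 1 ≥ m))).map
            (fun p => (i + (p.1 : Int), i + (p.2 : Int)))) := by
  intro k
  induction k with
  | zero =>
      intro l hl i
      have : l = [] := List.length_eq_zero_iff.mp (Nat.le_zero.mp hl)
      subst this
      simp [bGo, bStarts, bEnds]
  | succ k' ih =>
      intro l hl i
      cases l with
      | nil => simp [bGo, bStarts, bEnds]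
      | cons b rest =>
          set tw := rest.takeWhile (· == b) with htw
          set dw := rest.dropWhile (· == b) with hdw
          have hrep : tw = List.replicate tw.length b := by
            apply List.eq_replicate_length.mpr
            intro x hx
            have hx2 : x ∈ List.takeWhile (· == b) rest := htw ▸ hx
            simpa using List.mem_takeWhile_imp hx2
          have hsplitl : b :: rest = List.replicate (tw.length + 1) b ++ dw := by
            have : tw ++ dw = rest := List.takeWhile_append_dropWhile
            calc b :: rest = b :: (tw ++ dw) := by rw [this]
              _ = (b :: tw) ++ dw := rfl
              _ = (b :: List.replicate tw.length b) ++ dw := by rw [← hrep]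
              _ = List.replicate (tw.length + 1) b ++ dw := rfl
          have hdwlen : dw.length ≤ k' := by
            have h1 : dw.length ≤ rest.length := by
              rw [hdw]; exact List.length_dropWhile_le _ _
            simp at hl
            omega
          have hstep : bGo m (b :: rest) i
              = (if b = true ∧ ((tw.length : Int) + 1) ≥ m
                  then [(i, i + ((tw.length : Int) + 1) - 1)] else [])
                ++ bGo m dw (i + ((tw.length : Int) + 1)) := by
            simp only [bGo]
            rw [htw, hdw]
          rw [hstep, ih dw hdwlen]
          set L : Nat := tw.length + 1 with hLdef
          have hLcast : ((tw.length : Int) + 1) = (L : Int) := by rw [hLdef]; push_cast; ring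
          cases b with
          | true =>
              have hdwf : dw.getD 0 false = false := by
                cases hdwc : dw with
                | nil => rfl
                | cons y ys =>
                    have hy : (y == true) = false := by
                      apply head_dropWhile_false (· == true) rest
                      rw [hdw] at hdwc
                      rw [hdwc]; rfl
                    simp at hy
                    simp [hy]
              rw [hsplitl]
              rw [starts_true_run L (by omega) dw hdwf, ends_true_run L (by omega) dw hdwf]
              rw [List.zip_cons_cons, List.zip_map]
              rw [List.filter_cons]
              have hc1 : (decide (((L - 1 : Nat) : Int) - ((0 : Nat) : Int) + 1 ≥ m))
                  = decide ((L : Int) ≥ m) := by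
                have : ((L - 1 : Nat) : Int) = (L : Int) - 1 := by
                  have : 1 ≤ L := by omega
                  push_cast [this]; ring
                rw [this]
                congr 1
                apply propext; constructor <;> intro h <;> omega
              rw [List.filter_map]
              have hc2 : ((fun p : Nat × Nat => decide ((p.2 : Int) - (p.1 : Int) + 1 ≥ m)) ∘
                    (Prod.map (fun j : Nat => L + j) (fun j : Nat => L + j)))
                  = (fun p : Nat × Nat => decide ((p.2 : Int) - (p.1 : Int) + 1 ≥ m)) := by
                funext p
                simp only [Function.comp, Prod.map]
                congr 1
                apply propext; constructor <;> intro h <;> push_cast at * <;> omega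
              rw [hc2, hc1]
              simp only [hLcast]
              by_cases hm : (L : Int) ≥ m
              · rw [if_pos (show _ ∧ (L : Int) ≥ m from ⟨by trivial, hm⟩),
                    if_pos (by simpa using hm)]
                rw [List.singleton_append, List.map_cons, List.map_map]
                congr 1
                · have h1L : 1 ≤ L := by omega
                  have hc : ((L - 1 : Nat) : Int) = (L : Int) - 1 := by push_cast [h1L]; ring
                  rw [Prod.ext_iff]
                  exact ⟨by push_cast; ring, by simp only [hc]; ring⟩
                · apply List.map_congr_left
                  intro p hp
                  simp only [Function.comp, Prod.map, Prod.mk.injEq]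
                  exact ⟨by push_cast; ring, by push_cast; ring⟩
              · rw [if_neg (by simp [hm]), if_neg (by simpa using hm)]
                rw [List.map_map, List.nil_append]
                apply List.map_congr_left
                intro p hp
                simp only [Function.comp, Prod.map, Prod.mk.injEq]
                exact ⟨by push_cast; ring, by push_cast; ring⟩
          | false =>
              rw [hsplitl]
              rw [starts_false_run L dw, ends_false_run L dw]
              rw [List.zip_map]
              rw [List.filter_map]
              have hc2 : ((fun p : Nat × Nat => decide ((p.2 : Int) - (p.1 : Int) + 1 ≥ m)) ∘
                    (Prod.map (fun j : Nat => L + j) (fun j : Nat => L + j)))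
                  = (fun p : Nat × Nat => decide ((p.2 : Int) - (p.1 : Int) + 1 ≥ m)) := by
                funext p
                simp only [Function.comp, Prod.map]
                congr 1
                apply propext; constructor <;> intro h <;> push_cast at * <;> omega
              rw [hc2]
              simp only [hLcast]
              rw [if_neg (by simp)]
              rw [List.map_map, List.nil_append]
              apply List.map_congr_left
              intro p hp
              simp only [Function.comp, Prod.map, Prod.mk.injEq]
              refine ⟨by push_cast; ring, by push_cast; ring⟩

-- ===== VERDICT =====
theorem find_periods_py_spec : Claim_equal_find_periods_py := by
  intro mask min_length _
  show find_periods_py mask min_length = find_periods_py_alt mask min_length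
  unfold find_periods_py find_periods_py_alt
  have hA : aGo min_length mask 0 none [] = bGo min_length mask 0 := by
    simpa using aGo_eq_bGo min_length mask.length mask le_rfl 0 []
  rw [hA, bGo_eq_boundaries min_length mask.length mask le_rfl 0]
  apply List.map_congr_left
  intro p hp
  simp
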